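-- pv_equiv track=rewrite | github.com/plturrell/a2a-sap-network | backend/app/a2a/agents/agentBuilder/active/enhancedAgentBuilderMcp.py | _optimize_dependencies
-- ===== SOURCE A (Python) =====
-- from typing import Dict, List, Any, Optional, Union, Callable, Tuple, Iterator, Set
-- from collections import OrderedDict, defaultdict, deque
--
-- def _optimize_dependencies(dependencies: List[str]) -> List[str]:
--     """Optimize dependency list"""
--     # Remove duplicates and sort
--     unique_deps = list(set(dependencies))
--
--     # Group by package
--     grouped_deps = defaultdict(list)
--     for dep in unique_deps:
--         package = dep.split('.')[0] if '.' in dep else dep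
--         grouped_deps[package].append(dep)
--
--     # Optimize imports
--     optimized = []
--     for package, imports in grouped_deps.items():
--         if len(imports) > 3:
--             # Use package import for many submodules
--             optimized.append(package)
--         else:
--             optimized.extend(imports)
--
--     return sorted(optimized)
-- ===== SOURCE B (Python) =====
-- from itertools import groupby
--
--
-- def _optimize_dependencies(dependencies):
--     """Optimize dependency list"""
--     key = lambda d: d.split('.')[0]
--     result = []
--     # sort the unique deps by package key, then scan consecutive package runs
--     for pkg, grp in groupby(sorted(set(dependencies), key=key), key=key):
--         members = list(grp)
--         if len(members) > 3:
--             result.append(pkg)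
--         else:
--             result.extend(members)
--     return sorted(result)
-- ===== Notes on version B (the rewrite author's own statement) =====
-- stated objective: alternative
-- what changed: B replaces A's defaultdict hash-grouping into per-package lists by sort-then-scan grouping: it sorts the unique deps by package key and uses itertools.groupby to walk consecutive package runs, collapsing runs longer than 3 to the package name; the final sorted() is unchanged.
import Mathlib
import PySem

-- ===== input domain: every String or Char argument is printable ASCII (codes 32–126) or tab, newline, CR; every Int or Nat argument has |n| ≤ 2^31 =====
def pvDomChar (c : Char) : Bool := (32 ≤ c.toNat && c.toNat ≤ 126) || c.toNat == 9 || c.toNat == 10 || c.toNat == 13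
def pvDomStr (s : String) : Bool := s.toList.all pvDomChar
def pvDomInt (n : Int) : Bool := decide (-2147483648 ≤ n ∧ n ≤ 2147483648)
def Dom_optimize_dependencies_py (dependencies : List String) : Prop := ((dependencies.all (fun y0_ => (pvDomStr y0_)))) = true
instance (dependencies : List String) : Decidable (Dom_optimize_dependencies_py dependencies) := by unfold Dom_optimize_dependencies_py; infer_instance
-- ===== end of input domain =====

-- B builds the groups by sorting the unique deps on their package key and scanning consecutive
-- runs (itertools.groupby) instead of A's defaultdict hash-grouping; same return value.

-- ===== PORT A =====
-- package = dep.split('.')[0] if '.' in dep else dep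
def pvPkgA (dep : String) : String :=
  if PySem.Str.isIn "." dep then
    PySem.List.pyGetD ((PySem.Str.split? dep ".").getD []) 0 ""   -- split('.') never raises and never returns []
  else dep

def optimize_dependencies_py (dependencies : List String) : List String :=
  -- unique_deps = list(set(dependencies))
  let unique_deps : List String := PySem.Set.ofList dependencies
  -- grouped_deps = defaultdict(list); for dep in unique_deps: grouped_deps[package].append(dep)
  let grouped : PySem.Dict String (List String) :=
    unique_deps.foldl (fun d dep => d.modify (pvPkgA dep) [] (fun l => l ++ [dep])) PySem.Dict.empty
  -- for package, imports in grouped_deps.items(): append package / extend imports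
  let optimized : List String :=
    grouped.items.foldl (fun acc pr => if 3 < pr.2.length then acc ++ [pr.1] else acc ++ pr.2) []
  PySem.List.sorted optimized (fun x => x) false

-- ===== PORT B =====
-- key = lambda d: d.split('.')[0]
def pvKeyB (dep : String) : String :=
  PySem.List.pyGetD ((PySem.Str.split? dep ".").getD []) 0 ""   -- split('.') never raises and never returns []

-- itertools.groupby(S, key): consecutive runs of equal key, each yielded with its key
def pvGroupby (key : String → String) : List String → List (String × List String)
  | [] => []
  | x :: xs =>
      (key x, x :: xs.takeWhile (fun y => key y == key x)) ::
        pvGroupby key (xs.dropWhile (fun y => key y == key x))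
  termination_by l => l.length
  decreasing_by
    have := List.length_dropWhile_le (fun y => key y == key x) xs
    simp; omega

def optimize_dependencies_py_alt (dependencies : List String) : List String :=
  -- sorted(set(dependencies), key=key)
  let sortedDeps : List String := PySem.List.sorted (PySem.Set.ofList dependencies) pvKeyB false
  -- for pkg, grp in groupby(sortedDeps, key=key): append pkg / extend members
  let result : List String :=
    (pvGroupby pvKeyB sortedDeps).foldl
      (fun acc pr => if 3 < pr.2.length then acc ++ [pr.1] else acc ++ pr.2) []
  PySem.List.sorted result (fun x => x) false

-- ===== PRECONDITION & SPEC =====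
def Spec_optimize_dependencies_py (dependencies : List String) (out : List String) : Prop := out = optimize_dependencies_py_alt dependencies
instance (dependencies : List String) (out : List String) : Decidable (Spec_optimize_dependencies_py dependencies out) := by unfold Spec_optimize_dependencies_py; infer_instance

-- ===== CLAIM (what is proved, stated in full; the proofs are below) =====
def Claim_equal_optimize_dependencies_py : Prop := ∀ (dependencies : List String), Dom_optimize_dependencies_py dependencies → Spec_optimize_dependencies_py dependencies (optimize_dependencies_py dependencies)

-- ===== LEMMAS AND PROOFS =====

-- the first piece produced by splitOn on '.' is the run of characters before the first '.'
theorem pv_go_dot (fuel : Nat) : ∀ (l cur : List Char) (acc : List (List Char)), l.length < fuel →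
    ∃ rest, PySem.Chars.splitOn.go ['.'] fuel l cur acc
      = acc.reverse ++ (cur.reverse ++ l.takeWhile (fun c => c != '.')) :: rest := by
  induction fuel with
  | zero => intro l cur acc h; omega
  | succ fuel ih =>
    intro l cur acc h
    match l with
    | [] => exact ⟨[], by simp [PySem.Chars.splitOn.go]⟩
    | c :: rest' =>
      rw [PySem.Chars.splitOn.go]
      by_cases hc : c = '.'
      · subst hc
        have hpre : List.isPrefixOf ['.'] ('.' :: rest') = true := by
          simp [List.isPrefixOf]
        rw [if_pos hpre]
        obtain ⟨r, hr⟩ := ih (List.drop (['.'] : List Char).length ('.' :: rest')) [] (cur.reverse :: acc) (by simp at h ⊢; omega)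
        refine ⟨(List.takeWhile (fun c => c != '.') rest') :: r, ?_⟩
        rw [hr]
        simp [List.takeWhile]
      · have hpre : List.isPrefixOf ['.'] (c :: rest') = false := by
          simp [List.isPrefixOf, Ne.symm hc]
        rw [if_neg (by simp [hpre])]
        obtain ⟨r, hr⟩ := ih rest' (c :: cur) acc (by simp at h ⊢; omega)
        refine ⟨r, ?_⟩
        rw [hr]
        have hb : (c != '.') = true := by simp [hc]
        simp [List.takeWhile, hb]

-- B's key is the run of characters before the first '.'
theorem pv_keyB_eq_takeWhile (dep : String) :
    pvKeyB dep = String.ofList (dep.toList.takeWhile (fun c => c != '.')) := by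
  unfold pvKeyB
  have hs : PySem.Str.split? dep "." = some (List.map String.ofList (PySem.Chars.splitOn dep.toList ['.'])) := by
    simp [PySem.Str.split?, PySem.Chars.split?]
  rw [hs]
  obtain ⟨rest, hr⟩ := pv_go_dot (dep.toList.length + 1) dep.toList [] [] (by omega)
  unfold PySem.Chars.splitOn
  rw [hr]
  simp [PySem.List.pyGetD_zero]

-- A's package key equals B's key
theorem pv_pkg_eq (dep : String) : pvPkgA dep = pvKeyB dep := by
  unfold pvPkgA
  by_cases h : PySem.Str.isIn "." dep = true
  · rw [if_pos h]; rfl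
  · rw [if_neg h, pv_keyB_eq_takeWhile]
    have hmem : ∀ c ∈ dep.toList, (c != '.') = true := by
      intro c hc
      simp only [bne_iff_ne, ne_eq]
      rintro rfl
      apply h
      rw [PySem.Str.isIn_iff_infix]
      obtain ⟨s, t, hst⟩ := List.append_of_mem hc
      exact ⟨s, t, by rw [hst]; simp⟩
    rw [List.takeWhile_eq_self_iff.mpr hmem]
    exact (String.ofList_toList ..).symm

theorem pv_foldl_if_append (l : List (String × List String)) (acc : List String) :
    l.foldl (fun acc pr => if 3 < pr.2.length then acc ++ [pr.1] else acc ++ pr.2) acc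
      = acc ++ l.flatMap (fun pr => if 3 < pr.2.length then [pr.1] else pr.2) := by
  induction l generalizing acc with
  | nil => simp
  | cons x xs ih =>
    simp only [List.foldl_cons, List.flatMap_cons]
    rw [ih]
    split_ifs <;> simp

-- A's result characterised over the unique list U = set(dependencies)
theorem pv_A_eq (dependencies : List String) :
    optimize_dependencies_py dependencies
      = PySem.List.sorted
          ((PySem.Set.ofList ((PySem.Set.ofList dependencies).map pvKeyB)).flatMap
            (fun p =>
              if 3 < ((PySem.Set.ofList dependencies).filter (fun d => pvKeyB d == p)).length
              then [p]
              else (PySem.Set.ofList dependencies).filter (fun d => pvKeyB d == p)))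
          (fun x => x) false := by
  unfold optimize_dependencies_py
  simp only [pv_pkg_eq]
  set U := PySem.Set.ofList dependencies with hU
  set G := U.foldl (fun d dep => d.modify (pvKeyB dep) [] (fun l => l ++ [dep])) PySem.Dict.empty with hG
  have hkeys : G.keys = PySem.Set.ofList (U.map pvKeyB) := by
    rw [hG, PySem.Dict.keys_foldl_modify_key U pvKeyB [] (fun _ dep l => l ++ [dep]) PySem.Dict.empty]
    exact PySem.Set.update_nil_left _
  have hnodup : G.keys.Nodup := by rw [hkeys]; exact PySem.Set.nodup_ofList _
  have hgetD : ∀ p, G.getD p [] = U.filter (fun d => pvKeyB d == p) := by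
    intro p
    rw [hG, ← List.foldl_map (f := fun dep => (pvKeyB dep, dep))
          (g := fun (d : PySem.Dict String (List String)) (pr : String × String) => d.modify pr.1 [] (fun l => l ++ [pr.2]))]
    rw [PySem.Dict.getD_foldl_modify_append]
    rw [List.filter_map]
    rw [List.map_map]
    simp only [Function.comp_def]
    rw [List.map_id']
    simp [PySem.Dict.getD_empty]
  have hitems : G.items = (PySem.Set.ofList (U.map pvKeyB)).map (fun p => (p, U.filter (fun d => pvKeyB d == p))) := by
    rw [PySem.Dict.items_eq_map_keys G hnodup []]
    rw [hkeys]
    apply List.map_congr_left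
    intro p _
    rw [hgetD]
  rw [hitems, pv_foldl_if_append, List.nil_append, List.flatMap_map]

-- groupby over a list sorted by key: each group is exactly the key's fiber, the group
-- keys are duplicate-free, and they are exactly the keys occurring in the list
theorem pv_groups_spec (key : String → String) :
    ∀ (n : Nat) (S : List String), S.length ≤ n →
      S.Pairwise (fun a b => key a ≤ key b) →
      (∀ pr ∈ pvGroupby key S, pr.2 = S.filter (fun d => key d == pr.1))
      ∧ (∀ p, p ∈ (pvGroupby key S).map Prod.fst ↔ p ∈ S.map key)
      ∧ ((pvGroupby key S).map Prod.fst).Nodup := by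
  intro n
  induction n with
  | zero =>
    intro S hlen _
    have : S = [] := List.length_eq_zero_iff.mp (Nat.le_zero.mp hlen)
    subst this
    refine ⟨by intro pr h; simp [pvGroupby] at h, by simp [pvGroupby], by simp [pvGroupby]⟩
  | succ n ih =>
    intro S hlen hpw
    match S with
    | [] => refine ⟨by intro pr h; simp [pvGroupby] at h, by simp [pvGroupby], by simp [pvGroupby]⟩
    | x :: xs =>
      have hpx : ∀ y ∈ xs, key x ≤ key y := (List.pairwise_cons.mp hpw).1
      have hxs : xs.Pairwise (fun a b => key a ≤ key b) := (List.pairwise_cons.mp hpw).2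
      obtain ⟨t, ht⟩ : ∃ t, t = xs.takeWhile (fun y => key y == key x) := ⟨_, rfl⟩
      obtain ⟨r, hr⟩ : ∃ r, r = xs.dropWhile (fun y => key y == key x) := ⟨_, rfl⟩
      have hsplit : t ++ r = xs := by rw [ht, hr]; exact List.takeWhile_append_dropWhile
      -- every element of the run has key x
      have hkt : ∀ y ∈ t, key y = key x := by
        intro y hy
        rw [ht] at hy
        have := List.mem_takeWhile_imp hy
        simpa using this
      -- every element after the run has a strictly larger key
      have hkr : ∀ y ∈ r, key x < key y := by
        cases hr2 : r with
        | nil => intro y hy; simp at hy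
        | cons h0 r' =>
          have hd : xs.dropWhile (fun y => key y == key x) = h0 :: r' := hr.symm.trans hr2
          have hh0 : (fun y => key y == key x) h0 = false := by
            have h := List.head_dropWhile_not (fun y => key y == key x) (l := xs)
              (w := by rw [hd]; simp)
            simpa [hd] using h
          have hh0x : key h0 ≠ key x := by simpa using hh0
          have hh0mem : h0 ∈ xs := by
            have hmem0 : h0 ∈ xs.dropWhile (fun y => key y == key x) := by rw [hd]; simp
            exact (List.dropWhile_sublist _).subset hmem0
          have hlt : key x < key h0 := lt_of_le_of_ne (hpx h0 hh0mem) (Ne.symm hh0x)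
          have hrpw : (h0 :: r').Pairwise (fun a b => key a ≤ key b) := by
            rw [← hd]; exact hxs.sublist (List.dropWhile_sublist _)
          intro y hy
          rcases List.mem_cons.mp hy with rfl | hy'
          · exact hlt
          · exact lt_of_lt_of_le hlt ((List.pairwise_cons.mp hrpw).1 y hy')
      -- the fiber of key x is x :: run
      have hfib : (x :: xs).filter (fun d => key d == key x) = x :: t := by
        rw [← hsplit]
        simp only [List.filter_cons, List.filter_append]
        have h1 : (fun d => key d == key x) x = true := by simp
        rw [if_pos h1]
        have h2 : t.filter (fun d => key d == key x) = t :=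
          List.filter_eq_self.mpr (fun y hy => by simp [hkt y hy])
        have h3 : r.filter (fun d => key d == key x) = [] :=
          List.filter_eq_nil_iff.mpr (fun y hy => by simp [ne_of_gt (hkr y hy)])
        rw [h2, h3, List.append_nil]
      -- other fibers live entirely in the tail after the run
      have hfib2 : ∀ p, p ≠ key x → (x :: xs).filter (fun d => key d == p) = r.filter (fun d => key d == p) := by
        intro p hp
        rw [← hsplit]
        simp only [List.filter_cons, List.filter_append]
        have h1 : (fun d => key d == p) x = false := by simp [Ne.symm hp]
        rw [if_neg (by simp [h1])]
        have h2 : t.filter (fun d => key d == p) = [] :=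
          List.filter_eq_nil_iff.mpr (fun y hy => by simp [hkt y hy, Ne.symm hp])
        rw [h2, List.nil_append]
      have hrlen : r.length ≤ n := by
        have h1 := List.length_dropWhile_le (fun y => key y == key x) xs
        rw [← hr] at h1
        simp only [List.length_cons] at hlen
        omega
      obtain ⟨ih1, ih2, ih3⟩ := ih r hrlen (by rw [hr]; exact hxs.sublist (List.dropWhile_sublist _))
      have hgb : pvGroupby key (x :: xs) = (key x, x :: t) :: pvGroupby key r := by
        rw [pvGroupby, ← ht, ← hr]
      -- keys of the recursive groups are keys of elements of r, hence ≠ key x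
      have hrecne : ∀ p ∈ (pvGroupby key r).map Prod.fst, p ≠ key x := by
        intro p hp
        obtain ⟨y, hy, hyk⟩ := List.mem_map.mp ((ih2 p).mp hp)
        exact fun h => absurd (hyk.trans h) (ne_of_gt (hkr y hy))
      refine ⟨?_, ?_, ?_⟩
      · intro pr hpr
        rw [hgb] at hpr
        rcases List.mem_cons.mp hpr with h | h
        · subst h; exact hfib.symm
        · have hne : pr.1 ≠ key x := hrecne pr.1 (List.mem_map.mpr ⟨pr, h, rfl⟩)
          rw [hfib2 pr.1 hne]
          exact ih1 pr h
      · intro p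
        rw [hgb]
        simp only [List.map_cons, List.mem_cons, ih2]
        constructor
        · rintro (rfl | hp)
          · exact Or.inl rfl
          · obtain ⟨y, hy, hyk⟩ := List.mem_map.mp hp
            have hyxs : y ∈ xs := by
              rw [hr] at hy; exact (List.dropWhile_sublist _).subset hy
            exact Or.inr (List.mem_map.mpr ⟨y, hyxs, hyk⟩)
        · rintro (rfl | hp)
          · exact Or.inl rfl
          · obtain ⟨y, hy, hyk⟩ := List.mem_map.mp hp
            rw [← hsplit] at hy
            rcases List.mem_append.mp hy with hy'' | hy''
            · exact Or.inl (by rw [← hyk, hkt y hy''])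
            · exact Or.inr (List.mem_map.mpr ⟨y, hy'', hyk⟩)
      · rw [hgb]
        simp only [List.map_cons, List.nodup_cons]
        exact ⟨fun h => hrecne (key x) h rfl, ih3⟩

-- B unfolded: sort by key, group consecutively, collapse/extend, final sort
theorem pv_B_unfold (dependencies : List String) :
    optimize_dependencies_py_alt dependencies
      = PySem.List.sorted
          ((pvGroupby pvKeyB (PySem.List.sorted (PySem.Set.ofList dependencies) pvKeyB false)).foldl
            (fun acc pr => if 3 < pr.2.length then acc ++ [pr.1] else acc ++ pr.2) [])
          (fun x => x) false := rfl

-- ===== VERDICT (by name: the statement is the Claim_ definition above) =====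
theorem optimize_dependencies_py_spec : Claim_equal_optimize_dependencies_py := by
  intro deps _
  unfold Spec_optimize_dependencies_py
  rw [pv_A_eq, pv_B_unfold]
  set U := PySem.Set.ofList deps with hUdef
  set S := PySem.List.sorted U pvKeyB false with hSdef
  have hSU : S.Perm U := PySem.List.sorted_perm U pvKeyB false
  obtain ⟨hfib, hmem, hnd⟩ :=
    pv_groups_spec pvKeyB S.length S le_rfl (PySem.List.sorted_pairwise U pvKeyB)
  rw [pv_foldl_if_append, List.nil_append]
  -- rewrite B's grouped flatMap as a flatMap over the (duplicate-free) group keys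
  have hBjoin : (pvGroupby pvKeyB S).flatMap (fun pr => if 3 < pr.2.length then [pr.1] else pr.2)
      = ((pvGroupby pvKeyB S).map Prod.fst).flatMap
          (fun p => if 3 < (S.filter (fun d => pvKeyB d == p)).length then [p]
                    else S.filter (fun d => pvKeyB d == p)) := by
    rw [List.flatMap_map]
    exact List.flatMap_congr (fun pr hpr => by rw [hfib pr hpr])
  rw [hBjoin]
  -- the two pre-sort lists are permutations of one another, so sorting them agrees
  apply PySem.List.sorted_eq_sorted_of_perm _ _ _ (fun _ _ h => h)
  apply List.Perm.flatMap
  · -- the key lists: both duplicate-free, same members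
    apply (List.perm_ext_iff_of_nodup (PySem.Set.nodup_ofList _) hnd).mpr
    intro p
    rw [PySem.Set.mem_ofList, hmem p]
    exact ⟨fun h => (hSU.map pvKeyB).symm.mem_iff.mp h, fun h => (hSU.map pvKeyB).mem_iff.mp h⟩
  · -- the fibers over U and over S are permutations with equal lengths
    intro p _
    have hperm : (U.filter (fun d => pvKeyB d == p)).Perm (S.filter (fun d => pvKeyB d == p)) :=
      (hSU.filter _).symm
    rw [hperm.length_eq]
    split_ifs
    · exact List.Perm.refl _
    · exact hperm
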